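-- pv_equiv track=rewrite | github.com/kiscsonti/GraphMatching_SameVsSimilar | pythonCompiler/oaei-resources/utils/utilities.py | exclude_empty_abstracts
-- ===== SOURCE A (Python) =====
-- from itertools import compress
--
-- def exclude_empty_abstracts(src_abstracts, target_abstracts, alignment):
--     flags = list()
--     for sa, ta, al in zip(src_abstracts, target_abstracts, alignment):
--         if sa == "" or ta == "":
--             flags.append(False)
--         else:
--             flags.append(True)
--
--     src_abstracts = list(compress(src_abstracts, flags))
--     target_abstracts = list(compress(target_abstracts, flags))
--     alignment = list(compress(alignment, flags))
--     return src_abstracts, target_abstracts, alignment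
-- ===== SOURCE B (Python) =====
-- def exclude_empty_abstracts(src_abstracts, target_abstracts, alignment):
--     kept_src, kept_target, kept_alignment = [], [], []
--     for sa, ta, al in zip(src_abstracts, target_abstracts, alignment):
--         if sa != "" and ta != "":
--             kept_src.append(sa)
--             kept_target.append(ta)
--             kept_alignment.append(al)
--     return kept_src, kept_target, kept_alignment
-- ===== Notes on version B (the rewrite author's own statement) =====
-- stated objective: simpler
-- what changed: Replaces the boolean-flags table plus three separate itertools.compress passes by one zip pass that appends surviving triples to three result lists.
import Mathlib
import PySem

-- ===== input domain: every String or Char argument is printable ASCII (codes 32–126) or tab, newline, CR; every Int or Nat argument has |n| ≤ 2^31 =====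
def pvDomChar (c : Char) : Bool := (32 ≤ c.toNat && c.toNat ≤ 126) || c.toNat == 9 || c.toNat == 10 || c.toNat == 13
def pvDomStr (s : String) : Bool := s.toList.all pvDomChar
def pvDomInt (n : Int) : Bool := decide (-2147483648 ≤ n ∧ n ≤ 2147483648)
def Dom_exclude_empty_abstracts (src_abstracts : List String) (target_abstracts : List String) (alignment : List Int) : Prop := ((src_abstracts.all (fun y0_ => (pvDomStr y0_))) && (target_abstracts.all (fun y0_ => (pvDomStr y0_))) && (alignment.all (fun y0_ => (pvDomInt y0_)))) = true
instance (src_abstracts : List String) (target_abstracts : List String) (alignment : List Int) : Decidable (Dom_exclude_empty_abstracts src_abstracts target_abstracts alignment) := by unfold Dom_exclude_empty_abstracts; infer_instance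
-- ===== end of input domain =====

-- B replaces A's boolean-flags table and three itertools.compress passes with one
-- filtering pass over the zipped triples (objective: simpler); same return value.


-- ===== PORT A =====
-- itertools.compress(xs, flags): keep xs[i] where flags[i] is truthy (stops at shorter).
def pvCompress {α : Type} (xs : List α) (flags : List Bool) : List α :=
  ((xs.zip flags).filter (fun p => p.2)).map (fun p => p.1)

def exclude_empty_abstracts (src_abstracts : List String) (target_abstracts : List String) (alignment : List Int) : List String × List String × List Int :=
  -- flags = []; for sa, ta, al in zip(...): append False if sa=="" or ta=="" else True
  let flags := (src_abstracts.zip (target_abstracts.zip alignment)).foldl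
    (fun acc x => if x.1 == "" || x.2.1 == "" then acc ++ [false] else acc ++ [true]) []
  (pvCompress src_abstracts flags, pvCompress target_abstracts flags, pvCompress alignment flags)

-- ===== PORT B =====
def exclude_empty_abstracts_alt (src_abstracts : List String) (target_abstracts : List String) (alignment : List Int) : List String × List String × List Int :=
  -- single pass: append sa, ta, al to the three result lists when both abstracts non-empty
  (src_abstracts.zip (target_abstracts.zip alignment)).foldl
    (fun acc x => if x.1 != "" && x.2.1 != ""
      then (acc.1 ++ [x.1], acc.2.1 ++ [x.2.1], acc.2.2 ++ [x.2.2])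
      else acc)
    ([], [], [])

-- ===== PRECONDITION & SPEC =====
def Spec_exclude_empty_abstracts (src_abstracts : List String) (target_abstracts : List String) (alignment : List Int) (out : List String × List String × List Int) : Prop := out = exclude_empty_abstracts_alt src_abstracts target_abstracts alignment
instance (src_abstracts : List String) (target_abstracts : List String) (alignment : List Int) (out : List String × List String × List Int) : Decidable (Spec_exclude_empty_abstracts src_abstracts target_abstracts alignment out) := by unfold Spec_exclude_empty_abstracts; infer_instance

-- ===== CLAIM (what is proved, stated in full; the proofs are below) =====
def Claim_equal_exclude_empty_abstracts : Prop := ∀ (src_abstracts : List String) (target_abstracts : List String) (alignment : List Int), Dom_exclude_empty_abstracts src_abstracts target_abstracts alignment → Spec_exclude_empty_abstracts src_abstracts target_abstracts alignment (exclude_empty_abstracts src_abstracts target_abstracts alignment)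

-- ===== LEMMAS AND PROOFS =====

-- the keep-condition on a zipped triple
def pvKeep (x : String × String × Int) : Bool := x.1 != "" && x.2.1 != ""

-- A's flags loop computes the map of the keep-condition
theorem flags_eq (z : List (String × String × Int)) (acc : List Bool) :
    z.foldl (fun acc x => if x.1 == "" || x.2.1 == "" then acc ++ [false] else acc ++ [true]) acc
      = acc ++ z.map pvKeep := by
  induction z generalizing acc with
  | nil => simp
  | cons h tl ih =>
    simp only [List.foldl, List.map]
    have hk : pvKeep h = !(h.1 == "" || h.2.1 == "") := by
      simp [pvKeep, bne, Bool.not_or]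
    by_cases hc : (h.1 == "" || h.2.1 == "") = true
    · rw [if_pos hc, ih]
      rw [hc] at hk; simp [hk]
    · rw [if_neg hc, ih]
      rw [Bool.not_eq_true] at hc
      rw [hc] at hk; simp [hk]

-- B's fold with generalized accumulators
theorem alt_fold_eq (z : List (String × String × Int)) (s t : List String) (u : List Int) :
    z.foldl (fun (acc : List String × List String × List Int) x => if x.1 != "" && x.2.1 != ""
        then (acc.1 ++ [x.1], acc.2.1 ++ [x.2.1], acc.2.2 ++ [x.2.2]) else acc) (s, t, u)
      = (s ++ (z.filter pvKeep).map (fun p => p.1),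
         t ++ (z.filter pvKeep).map (fun p => p.2.1),
         u ++ (z.filter pvKeep).map (fun p => p.2.2)) := by
  induction z generalizing s t u with
  | nil => simp
  | cons h tl ih =>
    simp only [List.foldl, List.filter]
    by_cases hc : pvKeep h = true
    · simp only [pvKeep] at hc
      rw [if_pos hc, ih]
      simp [pvKeep, hc]
    · have hc' : (h.1 != "" && h.2.1 != "") = false := by
        simpa [pvKeep] using hc
      rw [hc']
      simp only [Bool.false_eq_true, if_false]
      rw [ih]
      simp [pvKeep, hc']

-- compress against the flags of the zipped triple projects out the filtered components
theorem compress_proj (s t : List String) (u : List Int) :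
    pvCompress s ((s.zip (t.zip u)).map pvKeep)
        = (((s.zip (t.zip u)).filter pvKeep).map (fun p => p.1))
    ∧ pvCompress t ((s.zip (t.zip u)).map pvKeep)
        = (((s.zip (t.zip u)).filter pvKeep).map (fun p => p.2.1))
    ∧ pvCompress u ((s.zip (t.zip u)).map pvKeep)
        = (((s.zip (t.zip u)).filter pvKeep).map (fun p => p.2.2)) := by
  induction s generalizing t u with
  | nil => simp [pvCompress]
  | cons sh st ih =>
    cases t with
    | nil => simp [pvCompress]
    | cons th tt =>
      cases u with
      | nil => simp [pvCompress]
      | cons uh ut =>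
        obtain ⟨i1, i2, i3⟩ := ih tt ut
        simp only [List.zip_cons_cons, List.map_cons, List.filter_cons]
        by_cases hc : pvKeep (sh, th, uh) = true
        · simp only [hc, if_true]
          refine ⟨?_, ?_, ?_⟩ <;>
            simp [pvCompress] at i1 i2 i3 ⊢ <;> assumption
        · simp only [Bool.not_eq_true] at hc
          simp only [hc, Bool.false_eq_true, if_false]
          refine ⟨?_, ?_, ?_⟩ <;>
            simp [pvCompress] at i1 i2 i3 ⊢ <;> assumption

-- ===== VERDICT (by name: the statement is the Claim_ definition above) =====
theorem exclude_empty_abstracts_spec : Claim_equal_exclude_empty_abstracts := by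
  intro s t u _
  unfold Spec_exclude_empty_abstracts exclude_empty_abstracts exclude_empty_abstracts_alt
  obtain ⟨c1, c2, c3⟩ := compress_proj s t u
  rw [alt_fold_eq, flags_eq]
  simp only [List.nil_append]
  rw [c1, c2, c3]
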